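-- pv_equiv track=rewrite | github.com/enjoy82/atcodersyozin | train/TR/ABC124c.py | ans2
-- ===== SOURCE A (Python) =====
-- def ans2(a):
-- 	c = 0
-- 	for i in range(len(a)):
-- 		if(i%2 == 0 and a[i]==0):
-- 			c = c + 1
-- 		elif(i%2 == 1 and a[i] == 1):
-- 			c = c + 1
-- 	return c
-- ===== SOURCE B (Python) =====
-- def ans2(a):
-- 	return a[::2].count(0) + a[1::2].count(1)
-- ===== Notes on version B (the rewrite author's own statement) =====
-- stated objective: idiomatic
-- what changed: Replaces the index-parity branching loop with two strided slices (even and odd positions) whose matches are counted with list.count and summed.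
import Mathlib
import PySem

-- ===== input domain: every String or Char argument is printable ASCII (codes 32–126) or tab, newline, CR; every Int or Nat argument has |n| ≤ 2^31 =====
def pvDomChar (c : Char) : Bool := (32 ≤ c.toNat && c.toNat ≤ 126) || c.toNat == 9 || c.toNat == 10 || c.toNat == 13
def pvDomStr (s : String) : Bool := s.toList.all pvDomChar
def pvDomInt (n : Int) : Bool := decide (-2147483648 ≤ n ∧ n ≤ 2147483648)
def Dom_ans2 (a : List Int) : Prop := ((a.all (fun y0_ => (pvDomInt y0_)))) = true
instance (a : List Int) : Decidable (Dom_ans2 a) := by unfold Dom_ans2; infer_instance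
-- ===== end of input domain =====

-- B replaces A's index-parity branching loop with two strided slices counted separately (idiomatic; same cost).

-- ===== PORT A =====
-- c = 0; for i in range(len(a)): if i%2==0 and a[i]==0: c += 1 elif i%2==1 and a[i]==1: c += 1; return c
def ans2 (a : List Int) : Int :=
  (PySem.List.pyRange 0 (PySem.List.len a)).foldl
    (fun c i =>
      if PySem.Int.mod i 2 = 0 ∧ PySem.List.pyGetD a i 0 = 0 then c + 1
      else if PySem.Int.mod i 2 = 1 ∧ PySem.List.pyGetD a i 0 = 1 then c + 1
      else c) 0

-- ===== PORT B =====
-- return a[::2].count(0) + a[1::2].count(1)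
-- slice? with step 2 never fails (step ≠ 0), so the .getD [] default is unreachable.
def ans2_alt (a : List Int) : Int :=
  (((PySem.List.slice? a none none 2).getD []).count 0 : Int)
    + (((PySem.List.slice? a (some 1) none 2).getD []).count 1 : Int)

-- ===== PRECONDITION & SPEC =====
def Spec_ans2 (a : List Int) (out : Int) : Prop := out = ans2_alt a
instance (a : List Int) (out : Int) : Decidable (Spec_ans2 a out) := by unfold Spec_ans2; infer_instance

-- ===== CLAIM (what is proved, stated in full; the proofs are below) =====
def Claim_equal_ans2 : Prop := ∀ (a : List Int), Dom_ans2 a → Spec_ans2 a (ans2 a)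

-- ===== LEMMAS AND PROOFS =====

-- the elements of a at even positions (0,2,4,…)
def pvEvens : List Int → List Int
  | [] => []
  | [x] => [x]
  | x :: _ :: r => x :: pvEvens r

-- the filterMap that slice? produces for a[::2]
theorem pvFmEven (a : List Int) :
    List.filterMap (fun k : Nat => a[(2 * (k : Int)).toNat]?)
      (List.range ((a.length + 1) / 2)) = pvEvens a := by
  induction a using pvEvens.induct with
  | case1 => simp [pvEvens]
  | case2 x => simp [pvEvens]
  | case3 x y r ih =>
    have hn : ((x :: y :: r).length + 1) / 2 = (r.length + 1) / 2 + 1 := by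
      simp; omega
    rw [hn, List.range_succ_eq_map, List.filterMap_cons, List.filterMap_map]
    have hstep : ∀ k : Nat,
        ((fun k : Nat => (x :: y :: r)[(2 * (k : Int)).toNat]?) ∘ Nat.succ) k
          = (fun k : Nat => r[(2 * (k : Int)).toNat]?) k := by
      intro k
      have h1 : (2 * ((Nat.succ k : Nat) : Int)).toNat = (2 * (k : Int)).toNat + 2 := by
        push_cast; omega
      simp only [Function.comp, h1]
      rfl
    rw [funext hstep, ih]
    norm_num [pvEvens]

-- the filterMap that slice? produces for a[1::2]
theorem pvFmOdd (a : List Int) :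
    List.filterMap (fun k : Nat => a[(1 + 2 * (k : Int)).toNat]?)
      (List.range (a.length / 2)) = pvEvens a.tail := by
  induction a using pvEvens.induct with
  | case1 => simp [pvEvens]
  | case2 x => simp [pvEvens]
  | case3 x y r ih =>
    have hn : (x :: y :: r).length / 2 = r.length / 2 + 1 := by simp; omega
    rw [hn, List.range_succ_eq_map, List.filterMap_cons, List.filterMap_map]
    have hstep : ∀ k : Nat,
        ((fun k : Nat => (x :: y :: r)[(1 + 2 * (k : Int)).toNat]?) ∘ Nat.succ) k
          = (fun k : Nat => r[(1 + 2 * (k : Int)).toNat]?) k := by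
      intro k
      have h1 : (1 + 2 * ((Nat.succ k : Nat) : Int)).toNat = (1 + 2 * (k : Int)).toNat + 2 := by
        push_cast; omega
      simp only [Function.comp, h1]
      rfl
    rw [funext hstep, ih]
    have ht : pvEvens (y :: r) = y :: pvEvens r.tail := by
      cases r <;> rfl
    have h0 : (1 + 2 * ((0 : Nat) : Int)).toNat = 1 := by decide
    simp [ht]


theorem pvSliceEven (a : List Int) :
    PySem.List.slice? a none none 2 = some (pvEvens a) := by
  have hsi : PySem.List.sliceIndices a.length none none 2 = (0, (a.length : Int), 2) := by
    simp [PySem.List.sliceIndices]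
  rw [PySem.List.slice?, hsi]
  norm_num
  have hc : (if 0 < a.length then (((a.length : Int) + 2 - 1) / 2).toNat else 0)
      = (a.length + 1) / 2 := by
    split_ifs with h <;> omega
  rw [hc, pvFmEven]

theorem pvSliceOdd (a : List Int) :
    PySem.List.slice? a (some 1) none 2 = some (pvEvens a.tail) := by
  cases a with
  | nil => rfl
  | cons x r =>
    have hsi : PySem.List.sliceIndices (x :: r).length (some 1) none 2
        = (1, ((x :: r).length : Int), 2) := by
      simp [PySem.List.sliceIndices]
    rw [PySem.List.slice?, hsi]
    norm_num
    have hc : (if 0 < r.length then (((r.length : Int) + 2 - 1) / 2).toNat else 0)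
        = (x :: r).length / 2 := by
      split_ifs with h <;> simp <;> omega
    rw [hc, pvFmOdd]
    rfl

-- the predicate A's loop body counts
def pvP (a : List Int) (k : Nat) : Bool :=
  decide ((k : Int) % 2 = 0 ∧ a.getD k 0 = 0) || decide ((k : Int) % 2 = 1 ∧ a.getD k 0 = 1)

theorem pvAcount (a : List Int) :
    ans2 a = ((List.range a.length).countP (pvP a) : Int) := by
  rw [ans2]
  have hbody : (fun (c : Int) (i : Int) =>
      if PySem.Int.mod i 2 = 0 ∧ PySem.List.pyGetD a i 0 = 0 then c + 1
      else if PySem.Int.mod i 2 = 1 ∧ PySem.List.pyGetD a i 0 = 1 then c + 1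
      else c)
      = (fun (c : Int) (i : Int) =>
        if (decide (PySem.Int.mod i 2 = 0 ∧ PySem.List.pyGetD a i 0 = 0)
            || decide (PySem.Int.mod i 2 = 1 ∧ PySem.List.pyGetD a i 0 = 1)) = true
        then c + 1 else c) := by
    funext c i
    by_cases h1 : PySem.Int.mod i 2 = 0 ∧ PySem.List.pyGetD a i 0 = 0
    · rw [if_pos h1, if_pos (by rw [decide_eq_true h1]; rfl)]
    · by_cases h2 : PySem.Int.mod i 2 = 1 ∧ PySem.List.pyGetD a i 0 = 1
      · rw [if_neg h1, if_pos h2, if_pos (by rw [decide_eq_true h2, Bool.or_true])]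
      · rw [if_neg h1, if_neg h2,
          if_neg (by rw [decide_eq_false h1, decide_eq_false h2]; simp)]
  rw [hbody, PySem.List.foldl_count_if, PySem.List.len, PySem.List.pyRange_one,
    List.countP_map]
  norm_num
  apply List.countP_congr
  intro k _
  simp [Function.comp, pvP, PySem.List.pyGetD_natCast]

-- main counting identity: A's count = matches at even positions + matches at odd positions
theorem pvMain (a : List Int) :
    (List.range a.length).countP (pvP a)
      = (pvEvens a).count 0 + (pvEvens a.tail).count 1 := by
  induction a using pvEvens.induct with
  | case1 => simp [pvEvens]
  | case2 x => simp [pvEvens, pvP, List.count_singleton]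
  | case3 x y r ih =>
    have hn : (x :: y :: r).length = r.length + 1 + 1 := by simp
    rw [hn, List.range_succ_eq_map, List.range_succ_eq_map]
    rw [List.countP_cons, List.countP_map, List.countP_cons, List.countP_map]
    have hshift : ((pvP (x :: y :: r) ∘ Nat.succ) ∘ Nat.succ) = pvP r := by
      funext k
      simp only [Function.comp, pvP]
      have hsucc : Nat.succ (Nat.succ k) = k + 2 := by omega
      have h2 : ((k + 2 : Nat) : Int) % 2 = (k : Int) % 2 := by push_cast; omega
      have hg : (x :: y :: r).getD (k + 2) 0 = r.getD k 0 := by rfl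
      simp only [hsucc, h2, hg]
    rw [hshift, ih]
    have hx : pvP (x :: y :: r) 0 = decide (x = 0) := by
      simp [pvP]
    have hy : (pvP (x :: y :: r) ∘ Nat.succ) 0 = decide (y = 1) := by
      simp [Function.comp, pvP]
    have he : pvEvens (x :: y :: r) = x :: pvEvens r := rfl
    have ht : pvEvens (x :: y :: r).tail = y :: pvEvens r.tail := by
      cases r <;> rfl
    rw [hx, hy, he, ht, List.count_cons, List.count_cons]
    by_cases h0 : x = 0 <;> by_cases h1 : y = 1 <;> simp [h0, h1] <;> omega

theorem pvBeq (a : List Int) :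
    ans2_alt a = ((pvEvens a).count 0 : Int) + ((pvEvens a.tail).count 1 : Int) := by
  rw [ans2_alt, pvSliceEven, pvSliceOdd]
  rfl

-- ===== VERDICT (by name: the statement is the Claim_ definition above) =====
theorem ans2_spec : Claim_equal_ans2 := by
  intro a _
  show ans2 a = ans2_alt a
  rw [pvAcount, pvMain, pvBeq]
  push_cast
  ring
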